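-- pv_equiv track=rewrite | github.com/simyoungjun/CMU_coding_test | day28.py | solution
-- ===== SOURCE A (Python) =====
-- def solution(n):
--     d = {0 : 0, 1 : 1}
--
--     for i in range(2, n + 1):
--         if i % 2 == 0:
--             d[i] = d[i//2]
--         else:
--             d[i] = d[(i - 1) // 2] + 1
--
--
--     return d[n]
-- ===== SOURCE B (Python) =====
-- def solution(n):
--     # count set bits of n directly (popcount), no DP table
--     return 0 if n <= 0 else (n & 1) + solution(n >> 1)
-- ===== Notes on version B (the rewrite author's own statement) =====
-- stated objective: faster
-- what changed: Replaces the O(n) DP dictionary of popcounts for every value 0..n with a direct O(log n) bit-scan recursion on n itself.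
-- outside the precondition, e.g. on solution(-3): A raises KeyError, B returns 0
-- crash fix: On negative n, A raises KeyError (n is never inserted into its table); B returns zero. — e.g. on solution(-3): A raises KeyError, B returns 0
import Mathlib
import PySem

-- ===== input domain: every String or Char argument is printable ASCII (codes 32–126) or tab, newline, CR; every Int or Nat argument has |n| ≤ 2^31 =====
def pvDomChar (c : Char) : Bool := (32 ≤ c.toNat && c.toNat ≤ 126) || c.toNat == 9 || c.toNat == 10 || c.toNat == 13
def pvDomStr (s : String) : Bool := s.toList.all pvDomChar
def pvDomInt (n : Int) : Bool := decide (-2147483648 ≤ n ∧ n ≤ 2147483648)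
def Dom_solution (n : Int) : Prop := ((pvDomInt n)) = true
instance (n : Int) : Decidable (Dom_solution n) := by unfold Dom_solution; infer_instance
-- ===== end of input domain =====

-- B replaces A's O(n) DP dictionary of popcounts for 0..n by a direct bit-scan recursion on n.

-- ===== PORT A =====
-- the loop body of A (one step of the for-loop over range(2, n+1))
def solutionStep (d : PySem.Dict Int Int) (i : Int) : PySem.Dict Int Int :=
  if PySem.Int.mod i 2 = 0 then
    d.insert i (d.getD (PySem.Int.floordiv i 2) 0)
  else
    d.insert i (d.getD (PySem.Int.floordiv (i - 1) 2) 0 + 1)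

def solution (n : Int) : Int :=
  let d : PySem.Dict Int Int := PySem.Dict.ofList [(0, 0), (1, 1)]
  let d := (PySem.List.pyRange 2 (n + 1) 1).foldl solutionStep d
  -- Python's d[n] raises KeyError when n is absent (n < 0); excluded by Pre_solution
  (d.get? n).getD 0

-- ===== PORT B =====
def solution_alt (n : Int) : Int :=
  if n ≤ 0 then 0 else PySem.Int.mod n 2 + solution_alt (PySem.Int.floordiv n 2)
termination_by n.toNat
decreasing_by
  have h2 : PySem.Int.floordiv n 2 = n / 2 := PySem.Int.floordiv_eq_ediv_of_pos (by omega)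
  rw [h2]; omega

-- ===== PRECONDITION & SPEC =====
-- Pre excludes n < 0, on which Python A raises KeyError (d[n] with n absent).
def Pre_solution (n : Int) : Prop := 0 ≤ n
instance (n : Int) : Decidable (Pre_solution n) := by unfold Pre_solution; infer_instance
def pvWitness_solution : Int := (6)

-- On negative n, A raises KeyError (n is never inserted into its table); B returns zero.
def Raises_solution (n : Int) : Prop := n < 0
instance (n : Int) : Decidable (Raises_solution n) := by unfold Raises_solution; infer_instance
def pvRaiseWitness_solution : Int := (-3)
def pvRaiseWitnessOut_solution : Int := 0

def Spec_solution (n : Int) (out : Int) : Prop := out = solution_alt n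
instance (n : Int) (out : Int) : Decidable (Spec_solution n out) := by unfold Spec_solution; infer_instance

-- ===== CLAIM (what is proved, stated in full; the proofs are below) =====
def Claim_equal_solution : Prop := ∀ (n : Int), Dom_solution n → Pre_solution n → Spec_solution n (solution n)
def Claim_raises_solution : Prop := (∀ (n : Int), Dom_solution n → Raises_solution n → ¬ Pre_solution n) ∧ (Dom_solution (pvRaiseWitness_solution) ∧ Raises_solution (pvRaiseWitness_solution) ∧ solution_alt (pvRaiseWitness_solution) = pvRaiseWitnessOut_solution)

-- ===== LEMMAS AND PROOFS =====

theorem alt_zero : solution_alt 0 = 0 := by unfold solution_alt; norm_num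

theorem alt_one : solution_alt 1 = 1 := by
  unfold solution_alt
  norm_num [PySem.Int.mod_eq_emod_of_pos, PySem.Int.floordiv_eq_ediv_of_pos, alt_zero]

theorem alt_pos (n : Int) (h : 0 < n) :
    solution_alt n = PySem.Int.mod n 2 + solution_alt (PySem.Int.floordiv n 2) := by
  rw [solution_alt]; simp [show ¬ n ≤ 0 by omega]

-- the dictionary after folding the loop body over range(2, m) maps each 0 ≤ i (< 2 or < m) to popcount i
theorem loop_inv (m : Nat) :
    ∀ i : Int, 0 ≤ i → (i < 2 ∨ i < (m : Int)) →
      (((PySem.List.pyRange 2 (m : Int) 1).foldl solutionStep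
          (PySem.Dict.ofList [(0, 0), (1, 1)])).get? i) = some (solution_alt i) := by
  induction m with
  | zero =>
    intro i h0 h2
    rw [PySem.List.pyRange_one_eq_nil (by omega)]
    have h2' : i < 2 := by omega
    interval_cases i
    · rw [alt_zero]; decide
    · rw [alt_one]; decide
  | succ m ih =>
    intro i h0 hlt
    by_cases hm : (m : Int) < 2
    · rw [PySem.List.pyRange_one_eq_nil (by push_cast; omega)]
      have h2' : i < 2 := by omega
      interval_cases i
      · rw [alt_zero]; decide
      · rw [alt_one]; decide
    · -- m ≥ 2 : the range gains the element m at its end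
      rw [show ((m + 1 : Nat) : Int) = (m : Int) + 1 by push_cast; ring,
          PySem.List.pyRange_one_succ_right (by omega), List.foldl_append]
      simp only [List.foldl_cons, List.foldl_nil]
      set d := (PySem.List.pyRange 2 (m : Int) 1).foldl solutionStep
          (PySem.Dict.ofList [(0, 0), (1, 1)]) with hd
      by_cases hi : i = (m : Int)
      · rw [← hi]
        have hfd : PySem.Int.floordiv i 2 = i / 2 :=
          PySem.Int.floordiv_eq_ediv_of_pos (by omega)
        have hfd' : PySem.Int.floordiv (i - 1) 2 = (i - 1) / 2 :=
          PySem.Int.floordiv_eq_ediv_of_pos (by omega)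
        have hmod : PySem.Int.mod i 2 = i % 2 := PySem.Int.mod_eq_emod_of_pos (by omega)
        have hhalf : d.get? (i / 2) = some (solution_alt (i / 2)) := by
          apply ih _ (by omega) (by omega)
        have hgd : d.getD (i / 2) 0 = solution_alt (i / 2) := by
          rw [PySem.Dict.getD_eq_get?_getD, hhalf]; rfl
        have halt : solution_alt i = i % 2 + solution_alt (i / 2) := by
          rw [alt_pos i (by omega), hmod, hfd]
        unfold solutionStep
        rw [hmod]
        by_cases hpar : i % 2 = 0
        · rw [if_pos hpar, hfd, PySem.Dict.get?_insert_self, hgd, halt, hpar, zero_add]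
        · rw [if_neg hpar, hfd']
          have h12 : (i - 1) / 2 = i / 2 := by omega
          rw [h12, PySem.Dict.get?_insert_self, hgd, halt]
          have : i % 2 = 1 := by omega
          rw [this]; ring_nf
      · have hrest : d.get? i = some (solution_alt i) := ih i h0 (by omega)
        unfold solutionStep
        split
        · rw [PySem.Dict.get?_insert_of_ne, hrest]; exact hi
        · rw [PySem.Dict.get?_insert_of_ne, hrest]; exact hi

-- ===== VERDICT (by name: the statement is the Claim_ definition above) =====
theorem solution_spec : Claim_equal_solution := by
  intro n _ hpre
  unfold Spec_solution solution
  have hn : ((n + 1).toNat : Int) = n + 1 := by unfold Pre_solution at hpre; omega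
  have := loop_inv (n + 1).toNat n (by unfold Pre_solution at hpre; omega)
    (by omega)
  rw [hn] at this
  simp only [this, Option.getD_some]

@[simp]
theorem solution_raises : Claim_raises_solution := by
  unfold Claim_raises_solution
  refine ⟨by intro n _ h; unfold Raises_solution at h; unfold Pre_solution; omega, by decide, by decide, ?_⟩
  unfold pvRaiseWitness_solution pvRaiseWitnessOut_solution
  rw [solution_alt]; norm_num
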